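-- pv_equiv track=rewrite | github.com/ahmednasr999/openclaw-workspace | skills/slides/scripts/slides_planner_validate.py | match_expectation
-- ===== SOURCE A (Python) =====
-- def match_expectation(slides: list[dict], expectation: dict) -> tuple[bool, str]:
--     matched_candidates: list[dict] = []
--     for slide in slides:
--         if "slideNumber" in expectation and slide.get("slideNumber") != expectation["slideNumber"]:
--             continue
--         if "workingTitle" in expectation and slide.get("workingTitle") != expectation["workingTitle"]:
--             continue
--         matched_candidates.append(slide)
--         if slide.get("pattern") == expectation.get("pattern"):
--             return True, f"matched slide {slide.get('slideNumber')} ({slide.get('workingTitle')})"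
--     if matched_candidates:
--         patterns = ", ".join(
--             f"slide {slide.get('slideNumber')}={slide.get('pattern')!r}" for slide in matched_candidates
--         )
--         return False, f"matched candidates but none had expected pattern {expectation.get('pattern')!r}: {patterns}"
--     return False, "no matching slide found"
-- ===== SOURCE B (Python) =====
-- def match_expectation(slides: list[dict], expectation: dict) -> tuple[bool, str]:
--     def keeps(slide: dict) -> bool:
--         return all(
--             key not in expectation or slide.get(key) == expectation[key]
--             for key in ("slideNumber", "workingTitle")
--         )
--
--     candidates = [slide for slide in slides if keeps(slide)]
--     expected = expectation.get("pattern")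
--     hit = next((slide for slide in candidates if slide.get("pattern") == expected), None)
--     if hit is not None:
--         return True, f"matched slide {hit.get('slideNumber')} ({hit.get('workingTitle')})"
--     if candidates:
--         patterns = ", ".join(
--             f"slide {slide.get('slideNumber')}={slide.get('pattern')!r}" for slide in candidates
--         )
--         return False, f"matched candidates but none had expected pattern {expected!r}: {patterns}"
--     return False, "no matching slide found"
-- ===== Notes on version B (the rewrite author's own statement) =====
-- stated objective: alternative
-- what changed: Replaces A's single accumulating loop with early return by a filter pass producing the candidate list, a separate first-match search over it for the expected pattern, and message building per branch.
import Mathlib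
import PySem

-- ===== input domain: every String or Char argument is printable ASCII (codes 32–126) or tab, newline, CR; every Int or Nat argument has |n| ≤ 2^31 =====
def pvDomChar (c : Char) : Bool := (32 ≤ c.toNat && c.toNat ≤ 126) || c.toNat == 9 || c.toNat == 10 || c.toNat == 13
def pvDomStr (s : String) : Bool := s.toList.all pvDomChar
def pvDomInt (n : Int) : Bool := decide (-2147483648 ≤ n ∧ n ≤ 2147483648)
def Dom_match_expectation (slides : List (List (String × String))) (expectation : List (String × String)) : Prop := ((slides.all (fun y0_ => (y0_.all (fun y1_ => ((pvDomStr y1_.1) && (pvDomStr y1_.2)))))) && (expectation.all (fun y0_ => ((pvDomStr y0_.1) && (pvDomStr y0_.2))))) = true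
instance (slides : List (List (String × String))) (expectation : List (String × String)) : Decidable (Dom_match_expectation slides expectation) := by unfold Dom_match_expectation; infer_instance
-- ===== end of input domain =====

-- B replaces A's accumulating loop+early-return by filter, then first-match search, then message building (objective: alternative decomposition, same cost).

-- shared Python-semantics helpers (dict.get / 'in' / str(...) of an optional / repr(...)):
def pvGet (d : List (String × String)) (k : String) : Option String :=
  (PySem.Dict.ofList d).get? k

def pvContains (d : List (String × String)) (k : String) : Bool :=
  (PySem.Dict.ofList d).contains k

-- f-string rendering of slide.get(...): None prints as "None"
def pvFStr (o : Option String) : String := o.getD "None"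

-- Python repr of a str, exact for printable ASCII plus tab/newline/CR (the stated domain)
def pvReprStr (s : String) : String :=
  let cs := s.toList
  let q : Char := if cs.contains '\'' && !(cs.contains '"') then '"' else '\''
  String.ofList ([q] ++ cs.flatMap (fun c =>
    if c = '\\' then ['\\', '\\']
    else if c = '\t' then ['\\', 't']
    else if c = '\n' then ['\\', 'n']
    else if c = '\r' then ['\\', 'r']
    else if c = q then ['\\', q]
    else [c]) ++ [q])

-- Python repr of an Optional[str]: repr(None) = "None"
def pvRepr (o : Option String) : String :=
  match o with
  | none => "None"
  | some s => pvReprStr s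

-- ===== PORT A =====
-- A's loop: accumulate matched_candidates, early return on first pattern match
def pvALoop (expectation : List (String × String)) :
    List (List (String × String)) → List (List (String × String)) → Bool × String
  | [], cands =>
    if cands.isEmpty then
      (false, "no matching slide found")
    else
      (false, "matched candidates but none had expected pattern " ++ pvRepr (pvGet expectation "pattern")
        ++ ": " ++ PySem.Str.join ", " (cands.map (fun slide =>
             "slide " ++ pvFStr (pvGet slide "slideNumber") ++ "=" ++ pvRepr (pvGet slide "pattern"))))
  | slide :: rest, cands =>
    if pvContains expectation "slideNumber" && (pvGet slide "slideNumber" != pvGet expectation "slideNumber") then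
      pvALoop expectation rest cands
    else if pvContains expectation "workingTitle" && (pvGet slide "workingTitle" != pvGet expectation "workingTitle") then
      pvALoop expectation rest cands
    else if pvGet slide "pattern" == pvGet expectation "pattern" then
      (true, "matched slide " ++ pvFStr (pvGet slide "slideNumber") ++ " (" ++ pvFStr (pvGet slide "workingTitle") ++ ")")
    else
      pvALoop expectation rest (cands ++ [slide])

def match_expectation (slides : List (List (String × String))) (expectation : List (String × String)) : Bool × String :=
  pvALoop expectation slides []

-- ===== PORT B =====
-- B's keeps(slide): all(key not in expectation or slide.get(key) == expectation[key] for key in (...))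
def pvKeeps (expectation slide : List (String × String)) : Bool :=
  ["slideNumber", "workingTitle"].all (fun key =>
    !(pvContains expectation key) || pvGet slide key == pvGet expectation key)

def match_expectation_alt (slides : List (List (String × String))) (expectation : List (String × String)) : Bool × String :=
  let candidates := slides.filter (pvKeeps expectation)
  let expected := pvGet expectation "pattern"
  match candidates.find? (fun slide => pvGet slide "pattern" == expected) with
  | some hit =>
    (true, "matched slide " ++ pvFStr (pvGet hit "slideNumber") ++ " (" ++ pvFStr (pvGet hit "workingTitle") ++ ")")
  | none =>
    if !candidates.isEmpty then
      (false, "matched candidates but none had expected pattern " ++ pvRepr expected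
        ++ ": " ++ PySem.Str.join ", " (candidates.map (fun slide =>
             "slide " ++ pvFStr (pvGet slide "slideNumber") ++ "=" ++ pvRepr (pvGet slide "pattern"))))
    else
      (false, "no matching slide found")

-- ===== PRECONDITION & SPEC =====
def Spec_match_expectation (slides : List (List (String × String))) (expectation : List (String × String)) (out : Bool × String) : Prop := out = match_expectation_alt slides expectation
instance (slides : List (List (String × String))) (expectation : List (String × String)) (out : Bool × String) : Decidable (Spec_match_expectation slides expectation out) := by unfold Spec_match_expectation; infer_instance

-- ===== CLAIM (what is proved, stated in full; the proofs are below) =====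
def Claim_equal_match_expectation : Prop := ∀ (slides : List (List (String × String))) (expectation : List (String × String)), Dom_match_expectation slides expectation → Spec_match_expectation slides expectation (match_expectation slides expectation)

-- ===== LEMMAS AND PROOFS =====

-- B's result as a function of the filtered candidate list and A's accumulator
def pvCore (expectation : List (String × String))
    (cands acc : List (List (String × String))) : Bool × String :=
  match cands.find? (fun slide => pvGet slide "pattern" == pvGet expectation "pattern") with
  | some hit =>
    (true, "matched slide " ++ pvFStr (pvGet hit "slideNumber") ++ " (" ++ pvFStr (pvGet hit "workingTitle") ++ ")")
  | none =>
    if (acc ++ cands).isEmpty then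
      (false, "no matching slide found")
    else
      (false, "matched candidates but none had expected pattern " ++ pvRepr (pvGet expectation "pattern")
        ++ ": " ++ PySem.Str.join ", " ((acc ++ cands).map (fun slide =>
             "slide " ++ pvFStr (pvGet slide "slideNumber") ++ "=" ++ pvRepr (pvGet slide "pattern"))))

lemma pvALoop_eq_core (expectation : List (String × String)) :
    ∀ (slides acc : List (List (String × String))),
      pvALoop expectation slides acc = pvCore expectation (slides.filter (pvKeeps expectation)) acc := by
  intro slides
  induction slides with
  | nil => intro acc; simp [pvALoop, pvCore]
  | cons slide rest ih =>
    intro acc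
    by_cases h1 : (pvContains expectation "slideNumber" && (pvGet slide "slideNumber" != pvGet expectation "slideNumber")) = true
    · have hk : pvKeeps expectation slide = false := by
        simp only [pvKeeps, List.all_cons, List.all_nil]
        simp only [Bool.and_eq_true, bne_iff_ne] at h1
        simp [h1.1, h1.2]
      simp [pvALoop, h1, hk, ih acc]
    · by_cases h2 : (pvContains expectation "workingTitle" && (pvGet slide "workingTitle" != pvGet expectation "workingTitle")) = true
      · have hk : pvKeeps expectation slide = false := by
          simp only [pvKeeps, List.all_cons, List.all_nil]
          simp only [Bool.and_eq_true, bne_iff_ne] at h2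
          simp [h2.1, h2.2]
        simp [pvALoop, h1, h2, hk, ih acc]
      · have hk : pvKeeps expectation slide = true := by
          simp only [pvKeeps, List.all_cons, List.all_nil]
          simp only [Bool.and_eq_true, bne_iff_ne, not_and_or, Bool.not_eq_true] at h1 h2
          rcases h1 with h1 | h1 <;> rcases h2 with h2 | h2 <;> simp_all
        by_cases hp : (pvGet slide "pattern" == pvGet expectation "pattern") = true
        · simp [pvALoop, h1, h2, hp, pvCore, List.filter_cons, hk]
        · simp only [pvALoop]
          rw [if_neg h1, if_neg h2, if_neg hp, ih (acc ++ [slide])]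
          simp [pvCore, List.filter_cons, hk, hp]

theorem match_expectation_spec : Claim_equal_match_expectation := by
  intro slides expectation _
  unfold Spec_match_expectation match_expectation match_expectation_alt
  rw [pvALoop_eq_core]
  simp only [pvCore]
  cases hf : (slides.filter (pvKeeps expectation)).find?
      (fun slide => pvGet slide "pattern" == pvGet expectation "pattern") with
  | some hit => simp
  | none =>
    simp only [List.nil_append]
    by_cases h : (List.filter (pvKeeps expectation) slides).isEmpty <;> simp [h]
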